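-- pv_equiv track=rewrite | github.com/mariecordes/gridgpt | src/gridgpt/crosswords.py | check_all_letters_connected
-- ===== SOURCE A (Python) =====
-- from typing import List, Tuple, Dict, Optional
--
-- def check_all_letters_connected(grid: List[List[str]], placed_words: List[Tuple[str, int, int, str]]) -> bool:
--     """Checks if all placed letters are connected."""
--     if not placed_words: return True
--
--     letter_positions = set()
--     for word, row, col, direction in placed_words:
--         for i in range(len(word)):
--             if direction == "across":
--                 pos = (row, col + i)
--                 if grid[row][col + i] != word[i]: return False
--             else:
--                 pos = (row + i, col)
--                 if grid[row + i][col] != word[i]: return False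
--             letter_positions.add(pos)
--
--     for row, col in letter_positions:
--         in_across = any(row == r and col >= c and col < c + len(w) for w, r, c, d in placed_words if d == "across")
--         in_down = any(col == c and row >= r and row < r + len(w) for w, r, c, d in placed_words if d == "down")
--         if not (in_across and in_down):
--             return False
--
--     return True
-- ===== SOURCE B (Python) =====
-- def check_all_letters_connected(grid, placed_words):
--     """One pass: verify each letter and build coverage sets; then a subset test
--     replaces A's second scan over placed_words."""
--     placed, across, down = set(), set(), set()
--     for word, row, col, direction in placed_words:
--         for i in range(len(word)):
--             if direction == "across":
--                 pos = (row, col + i)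
--             else:
--                 pos = (row + i, col)
--             if grid[pos[0]][pos[1]] != word[i]:
--                 return False
--             placed.add(pos)
--             if direction == "across":
--                 across.add(pos)
--             elif direction == "down":
--                 down.add(pos)
--     return placed <= (across & down)
-- ===== Notes on version B (the rewrite author's own statement) =====
-- stated objective: alternative
-- what changed: B merges verification and coverage into the single letter-checking pass, building placed/across/down coverage sets, and replaces A's whole second loop (which re-scans placed_words twice per letter position) by one subset test placed <= across & down.
import Mathlib
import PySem

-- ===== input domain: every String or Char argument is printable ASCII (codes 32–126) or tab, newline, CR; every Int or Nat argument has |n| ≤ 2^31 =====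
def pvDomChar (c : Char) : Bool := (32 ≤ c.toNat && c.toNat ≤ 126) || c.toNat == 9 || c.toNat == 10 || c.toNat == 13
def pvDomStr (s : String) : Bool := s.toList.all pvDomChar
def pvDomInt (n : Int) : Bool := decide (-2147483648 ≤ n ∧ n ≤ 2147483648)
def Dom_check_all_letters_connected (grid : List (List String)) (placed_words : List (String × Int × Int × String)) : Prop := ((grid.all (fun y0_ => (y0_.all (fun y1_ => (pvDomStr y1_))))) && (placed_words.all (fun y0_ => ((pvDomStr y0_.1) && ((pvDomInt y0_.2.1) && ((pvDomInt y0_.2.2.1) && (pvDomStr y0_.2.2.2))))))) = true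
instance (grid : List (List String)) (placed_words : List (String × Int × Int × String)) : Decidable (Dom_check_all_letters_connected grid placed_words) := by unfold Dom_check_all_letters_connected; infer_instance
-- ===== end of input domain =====

-- B folds the connectivity check into the letter-verification pass via coverage sets and a
-- final subset test, dropping A's second scan over placed_words. Equivalence is proved
-- unconditionally on the ports; Pre_ marks where the Python A raises (IndexError).

-- shared helpers: the position of letter i of a word, and the grid cell at a position
def pvPos (r c : Int) (d : String) (i : Int) : Int × Int :=
  if d == "across" then (r, c + i) else (r + i, c)

def pvCell (grid : List (List String)) (p : Int × Int) : Option String :=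
  (PySem.List.pyGet? grid p.1).bind (fun row => PySem.List.pyGet? row p.2)

-- ===== PORT A =====
-- inner loop 'for i in range(len(word))': none = IndexError, some none = 'return False',
-- some (some acc) = loop finished with letter_positions acc
def pvScanW (grid : List (List String)) (r c : Int) (d : String) :
    List Char → Int → List (Int × Int) → Option (Option (List (Int × Int)))
  | [], _, acc => some (some acc)
  | ch :: cs, i, acc =>
    match pvCell grid (pvPos r c d i) with
    | none => none
    | some cell =>
      if cell == String.ofList [ch] then
        pvScanW grid r c d cs (i + 1) (PySem.Set.add acc (pvPos r c d i))
      else some none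

-- outer loop 'for word, row, col, direction in placed_words'
def pvScanA (grid : List (List String)) :
    List (String × Int × Int × String) → List (Int × Int) → Option (Option (List (Int × Int)))
  | [], acc => some (some acc)
  | (w, r, c, d) :: ps, acc =>
    match pvScanW grid r c d w.toList 0 acc with
    | none => none
    | some none => some none
    | some (some acc') => pvScanA grid ps acc'

def pvInAcross (pw : List (String × Int × Int × String)) (pos : Int × Int) : Bool :=
  pw.any (fun q => q.2.2.2 == "across" && decide (pos.1 = q.2.1) &&
    decide (q.2.2.1 ≤ pos.2) && decide (pos.2 < q.2.2.1 + (q.1.toList.length : Int)))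

def pvInDown (pw : List (String × Int × Int × String)) (pos : Int × Int) : Bool :=
  pw.any (fun q => q.2.2.2 == "down" && decide (pos.2 = q.2.2.1) &&
    decide (q.2.1 ≤ pos.1) && decide (pos.1 < q.2.1 + (q.1.toList.length : Int)))

def check_all_letters_connected (grid : List (List String)) (placed_words : List (String × Int × Int × String)) : Bool :=
  if placed_words.isEmpty then true
  else
    match pvScanA grid placed_words [] with
    | none => false          -- Python raises here; outside Pre_
    | some none => false
    | some (some positions) =>
      positions.all (fun pos => pvInAcross placed_words pos && pvInDown placed_words pos)

-- ===== PORT B =====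
-- state = (placed, across, down) coverage sets
def pvScanWB (grid : List (List String)) (r c : Int) (d : String) :
    List Char → Int → (List (Int × Int) × List (Int × Int) × List (Int × Int)) →
    Option (Option (List (Int × Int) × List (Int × Int) × List (Int × Int)))
  | [], _, st => some (some st)
  | ch :: cs, i, st =>
    match pvCell grid (pvPos r c d i) with
    | none => none
    | some cell =>
      if cell == String.ofList [ch] then
        pvScanWB grid r c d cs (i + 1)
          (PySem.Set.add st.1 (pvPos r c d i),
           (if d == "across" then PySem.Set.add st.2.1 (pvPos r c d i) else st.2.1),
           (if d == "down" then PySem.Set.add st.2.2 (pvPos r c d i) else st.2.2))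
      else some none

def pvScanB (grid : List (List String)) :
    List (String × Int × Int × String) →
    (List (Int × Int) × List (Int × Int) × List (Int × Int)) →
    Option (Option (List (Int × Int) × List (Int × Int) × List (Int × Int)))
  | [], st => some (some st)
  | (w, r, c, d) :: ps, st =>
    match pvScanWB grid r c d w.toList 0 st with
    | none => none
    | some none => some none
    | some (some st') => pvScanB grid ps st'

def check_all_letters_connected_alt (grid : List (List String)) (placed_words : List (String × Int × Int × String)) : Bool :=
  match pvScanB grid placed_words ([], [], []) with
  | none => false            -- Python raises here; outside Pre_
  | some none => false
  | some (some st) => PySem.Set.issubset st.1 (PySem.Set.inter st.2.1 st.2.2)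

-- ===== PRECONDITION & SPEC =====
-- does letter i of word q sit in the grid / match its cell?
def pvInRangeAt (grid : List (List String)) (q : String × Int × Int × String) (i : Nat) : Bool :=
  (pvCell grid (pvPos q.2.1 q.2.2.1 q.2.2.2 (i : Int))).isSome

def pvMatchAt (grid : List (List String)) (q : String × Int × Int × String) (i : Nat) : Bool :=
  match pvCell grid (pvPos q.2.1 q.2.2.1 q.2.2.2 (i : Int)), q.1.toList[i]? with
  | some cell, some ch => cell == String.ofList [ch]
  | _, _ => false

-- Pre_ holds exactly when Python A raises no IndexError: every grid access the scan actually
-- reaches (all letters checked earlier matched their cells) is in range.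
def Pre_check_all_letters_connected (grid : List (List String)) (placed_words : List (String × Int × Int × String)) : Prop :=
  ∀ k < placed_words.length,
    (∀ q ∈ placed_words.take k, ∀ i < q.1.toList.length, pvMatchAt grid q i = true) →
    ∀ i < (placed_words[k]!).1.toList.length,
      (∀ i' < i, pvMatchAt grid (placed_words[k]!) i' = true) →
      pvInRangeAt grid (placed_words[k]!) i = true
instance (grid : List (List String)) (placed_words : List (String × Int × Int × String)) : Decidable (Pre_check_all_letters_connected grid placed_words) := by unfold Pre_check_all_letters_connected; infer_instance

def pvWitness_check_all_letters_connected : List (List String) × (List (String × Int × Int × String)) :=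
  ([["a", "b"], ["b", "x"]], [("ab", 0, 0, "across"), ("ab", 0, 0, "down")])

def Spec_check_all_letters_connected (grid : List (List String)) (placed_words : List (String × Int × Int × String)) (out : Bool) : Prop := out = check_all_letters_connected_alt grid placed_words
instance (grid : List (List String)) (placed_words : List (String × Int × Int × String)) (out : Bool) : Decidable (Spec_check_all_letters_connected grid placed_words out) := by unfold Spec_check_all_letters_connected; infer_instance

-- ===== CLAIM (what is proved, stated in full; the proofs are below) =====
def Claim_equal_check_all_letters_connected : Prop := ∀ (grid : List (List String)) (placed_words : List (String × Int × Int × String)), Dom_check_all_letters_connected grid placed_words → Pre_check_all_letters_connected grid placed_words → Spec_check_all_letters_connected grid placed_words (check_all_letters_connected grid placed_words)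

-- ===== LEMMAS AND PROOFS =====

-- A's scan is the first projection of B's scan (both check the same cells in the same order
-- and add the same positions to acc / placed).
theorem pvScanW_fst (grid : List (List String)) (r c : Int) (d : String) :
    ∀ (cs : List Char) (i : Int) (acc ac dn : List (Int × Int)),
    pvScanW grid r c d cs i acc =
      (pvScanWB grid r c d cs i (acc, ac, dn)).map (Option.map (fun st => st.1)) := by
  intro cs
  induction cs with
  | nil => intro i acc ac dn; simp [pvScanW, pvScanWB]
  | cons ch cs ih =>
    intro i acc ac dn
    simp only [pvScanW, pvScanWB]
    cases pvCell grid (pvPos r c d i) with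
    | none => rfl
    | some cell =>
      by_cases h : (cell == String.ofList [ch]) = true
      · simp only [h, if_pos]
        exact ih (i + 1) _ _ _
      · simp [h]

theorem pvScanA_fst (grid : List (List String)) :
    ∀ (pw : List (String × Int × Int × String)) (acc ac dn : List (Int × Int)),
    pvScanA grid pw acc =
      (pvScanB grid pw (acc, ac, dn)).map (Option.map (fun st => st.1)) := by
  intro pw
  induction pw with
  | nil => intro acc ac dn; simp [pvScanA, pvScanB]
  | cons q ps ih =>
    intro acc ac dn
    obtain ⟨w, r, c, d⟩ := q
    simp only [pvScanA, pvScanB]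
    rw [pvScanW_fst grid r c d w.toList 0 acc ac dn]
    cases h : pvScanWB grid r c d w.toList 0 (acc, ac, dn) with
    | none => rfl
    | some o =>
      cases o with
      | none => rfl
      | some st' => simpa using ih st'.1 st'.2.1 st'.2.2

-- membership in B's across/down sets after scanning one word
theorem pvScanWB_mem (grid : List (List String)) (r c : Int) (d : String) :
    ∀ (cs : List Char) (i : Int) st st',
    pvScanWB grid r c d cs i st = some (some st') →
    ∀ x : Int × Int,
      (x ∈ st'.2.1 ↔ x ∈ st.2.1 ∨ (d = "across" ∧ ∃ j : Int, i ≤ j ∧ j < i + cs.length ∧ x = pvPos r c d j)) ∧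
      (x ∈ st'.2.2 ↔ x ∈ st.2.2 ∨ (d = "down" ∧ ∃ j : Int, i ≤ j ∧ j < i + cs.length ∧ x = pvPos r c d j)) := by
  intro cs
  induction cs with
  | nil =>
    intro i st st' h x
    simp only [pvScanWB, Option.some.injEq] at h
    subst h
    constructor <;> simp <;> intro _ j h1 h2 <;> omega
  | cons ch cs ih =>
    intro i st st' h x
    have hlen : (((ch :: cs).length : Int)) = (cs.length : Int) + 1 := by simp
    cases hc : pvCell grid (pvPos r c d i) with
    | none => simp [pvScanWB, hc] at h
    | some cell =>
      simp only [pvScanWB, hc] at h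
      by_cases hm : (cell == String.ofList [ch]) = true
      · rw [if_pos hm] at h
        obtain ⟨h1, h2⟩ := ih (i + 1) _ st' h x
        constructor
        · rw [h1]
          by_cases hd : d = "across"
          · have hb : (d == "across") = true := by rw [hd]; decide
            rw [hb]
            simp only [if_pos, PySem.Set.mem_add]
            constructor
            · rintro ((hx | hx) | ⟨_, j, hj1, hj2, hj3⟩)
              · exact Or.inl hx
              · exact Or.inr ⟨hd, i, le_refl _, by omega, hx⟩
              · exact Or.inr ⟨hd, j, by omega, by omega, hj3⟩
            · rintro (hx | ⟨_, j, hj1, hj2, hj3⟩)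
              · exact Or.inl (Or.inl hx)
              · by_cases hji : j = i
                · exact Or.inl (Or.inr (hji ▸ hj3))
                · exact Or.inr ⟨hd, j, by omega, by omega, hj3⟩
          · have hb : (d == "across") = false := by simpa using hd
            rw [hb]
            simp only [Bool.false_eq_true, reduceIte]
            constructor
            · rintro (hx | ⟨hda, _⟩)
              · exact Or.inl hx
              · exact absurd hda hd
            · rintro (hx | ⟨hda, _⟩)
              · exact Or.inl hx
              · exact absurd hda hd
        · rw [h2]
          by_cases hd : d = "down"
          · have hb : (d == "down") = true := by rw [hd]; decide
            rw [hb]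
            simp only [if_pos, PySem.Set.mem_add]
            constructor
            · rintro ((hx | hx) | ⟨_, j, hj1, hj2, hj3⟩)
              · exact Or.inl hx
              · exact Or.inr ⟨hd, i, le_refl _, by omega, hx⟩
              · exact Or.inr ⟨hd, j, by omega, by omega, hj3⟩
            · rintro (hx | ⟨_, j, hj1, hj2, hj3⟩)
              · exact Or.inl (Or.inl hx)
              · by_cases hji : j = i
                · exact Or.inl (Or.inr (hji ▸ hj3))
                · exact Or.inr ⟨hd, j, by omega, by omega, hj3⟩
          · have hb : (d == "down") = false := by simpa using hd
            rw [hb]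
            simp only [Bool.false_eq_true, reduceIte]
            constructor
            · rintro (hx | ⟨hda, _⟩)
              · exact Or.inl hx
              · exact absurd hda hd
            · rintro (hx | ⟨hda, _⟩)
              · exact Or.inl hx
              · exact absurd hda hd
      · rw [if_neg hm] at h
        exact absurd h (by simp)

-- one-word coverage, phrased as the arithmetic tests A's second loop performs
def pvCovA (q : String × Int × Int × String) (x : Int × Int) : Prop :=
  q.2.2.2 = "across" ∧ x.1 = q.2.1 ∧ q.2.2.1 ≤ x.2 ∧ x.2 < q.2.2.1 + (q.1.toList.length : Int)

def pvCovD (q : String × Int × Int × String) (x : Int × Int) : Prop :=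
  q.2.2.2 = "down" ∧ x.2 = q.2.2.1 ∧ q.2.1 ≤ x.1 ∧ x.1 < q.2.1 + (q.1.toList.length : Int)

theorem pvCovA_iff (q : String × Int × Int × String) (x : Int × Int) :
    (q.2.2.2 = "across" ∧ ∃ j : Int, 0 ≤ j ∧ j < (0 : Int) + q.1.toList.length ∧ x = pvPos q.2.1 q.2.2.1 q.2.2.2 j)
      ↔ pvCovA q x := by
  unfold pvCovA
  obtain ⟨a, b⟩ := x
  constructor
  · rintro ⟨hd, j, h0, hj, hx⟩
    rw [pvPos, if_pos (by rw [hd]; decide)] at hx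
    have h1 : a = q.2.1 := congrArg Prod.fst hx
    have h2 : b = q.2.2.1 + j := congrArg Prod.snd hx
    exact ⟨hd, h1, by omega, by omega⟩
  · rintro ⟨hd, h1, h2, h3⟩
    refine ⟨hd, b - q.2.2.1, by omega, by omega, ?_⟩
    rw [pvPos, if_pos (by rw [hd]; decide)]
    simp only [Prod.mk.injEq]
    exact ⟨h1, by omega⟩

theorem pvCovD_iff (q : String × Int × Int × String) (x : Int × Int) :
    (q.2.2.2 = "down" ∧ ∃ j : Int, 0 ≤ j ∧ j < (0 : Int) + q.1.toList.length ∧ x = pvPos q.2.1 q.2.2.1 q.2.2.2 j)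
      ↔ pvCovD q x := by
  unfold pvCovD
  obtain ⟨a, b⟩ := x
  constructor
  · rintro ⟨hd, j, h0, hj, hx⟩
    rw [pvPos, if_neg (by rw [hd]; decide)] at hx
    have h1 : a = q.2.1 + j := congrArg Prod.fst hx
    have h2 : b = q.2.2.1 := congrArg Prod.snd hx
    exact ⟨hd, h2, by omega, by omega⟩
  · rintro ⟨hd, h1, h2, h3⟩
    refine ⟨hd, a - q.2.1, by omega, by omega, ?_⟩
    rw [pvPos, if_neg (by rw [hd]; decide)]
    simp only [Prod.mk.injEq]
    exact ⟨by omega, h1⟩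

-- membership in B's across/down sets after the whole scan
theorem pvScanB_mem (grid : List (List String)) :
    ∀ (pw : List (String × Int × Int × String)) st st',
    pvScanB grid pw st = some (some st') →
    ∀ x : Int × Int,
      (x ∈ st'.2.1 ↔ x ∈ st.2.1 ∨ ∃ q ∈ pw, pvCovA q x) ∧
      (x ∈ st'.2.2 ↔ x ∈ st.2.2 ∨ ∃ q ∈ pw, pvCovD q x) := by
  intro pw
  induction pw with
  | nil =>
    intro st st' h x
    simp only [pvScanB, Option.some.injEq] at h
    subst h
    simp
  | cons q ps ih =>
    intro st st' h x
    obtain ⟨w, r, c, d⟩ := q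
    simp only [pvScanB] at h
    cases hw : pvScanWB grid r c d w.toList 0 st with
    | none => rw [hw] at h; exact absurd h (by simp)
    | some o =>
      rw [hw] at h
      cases o with
      | none => exact absurd h (by simp)
      | some st1 =>
        have hmemw := pvScanWB_mem grid r c d w.toList 0 st st1 hw x
        have hmem := ih st1 st' h x
        obtain ⟨ha1, hd1⟩ := hmemw
        obtain ⟨ha2, hd2⟩ := hmem
        constructor
        · rw [ha2, ha1]
          rw [show ((d = "across" ∧ ∃ j : Int, 0 ≤ j ∧ j < (0:Int) + w.toList.length ∧ x = pvPos r c d j) ↔ pvCovA (w, r, c, d) x) from pvCovA_iff (w, r, c, d) x]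
          simp only [List.mem_cons]
          constructor
          · rintro ((hx | hx) | ⟨q', hq', hc'⟩)
            · exact Or.inl hx
            · exact Or.inr ⟨(w, r, c, d), Or.inl rfl, hx⟩
            · exact Or.inr ⟨q', Or.inr hq', hc'⟩
          · rintro (hx | ⟨q', hq' | hq', hc'⟩)
            · exact Or.inl (Or.inl hx)
            · exact Or.inl (Or.inr (hq' ▸ hc'))
            · exact Or.inr ⟨q', hq', hc'⟩
        · rw [hd2, hd1]
          rw [show ((d = "down" ∧ ∃ j : Int, 0 ≤ j ∧ j < (0:Int) + w.toList.length ∧ x = pvPos r c d j) ↔ pvCovD (w, r, c, d) x) from pvCovD_iff (w, r, c, d) x]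
          simp only [List.mem_cons]
          constructor
          · rintro ((hx | hx) | ⟨q', hq', hc'⟩)
            · exact Or.inl hx
            · exact Or.inr ⟨(w, r, c, d), Or.inl rfl, hx⟩
            · exact Or.inr ⟨q', Or.inr hq', hc'⟩
          · rintro (hx | ⟨q', hq' | hq', hc'⟩)
            · exact Or.inl (Or.inl hx)
            · exact Or.inl (Or.inr (hq' ▸ hc'))
            · exact Or.inr ⟨q', hq', hc'⟩

theorem pvInAcross_iff (pw : List (String × Int × Int × String)) (x : Int × Int) :
    pvInAcross pw x = true ↔ ∃ q ∈ pw, pvCovA q x := by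
  unfold pvInAcross pvCovA
  simp [List.any_eq_true, and_assoc]

theorem pvInDown_iff (pw : List (String × Int × Int × String)) (x : Int × Int) :
    pvInDown pw x = true ↔ ∃ q ∈ pw, pvCovD q x := by
  unfold pvInDown pvCovD
  simp [List.any_eq_true, and_assoc]

-- ===== VERDICT (by name: the statement is the Claim_ definition above) =====
theorem check_all_letters_connected_spec : Claim_equal_check_all_letters_connected := by
  intro grid pw _ _
  unfold Spec_check_all_letters_connected
  unfold check_all_letters_connected check_all_letters_connected_alt
  by_cases hpw : pw = []
  · subst hpw
    simp [pvScanB, PySem.Set.issubset]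
  · rw [if_neg (by simpa using hpw)]
    rw [pvScanA_fst grid pw [] [] []]
    cases h : pvScanB grid pw ([], [], []) with
    | none => rfl
    | some o =>
      cases o with
      | none => rfl
      | some st' =>
        simp only [Option.map_some]
        rw [Bool.eq_iff_iff]
        rw [List.all_eq_true, PySem.Set.issubset_iff]
        have hmem := pvScanB_mem grid pw ([], [], []) st' h
        constructor
        · intro hall x hx
          have := hall x hx
          rw [Bool.and_eq_true, pvInAcross_iff, pvInDown_iff] at this
          rw [PySem.Set.mem_inter]
          obtain ⟨h1, h2⟩ := this
          obtain ⟨ha, hd⟩ := hmem x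
          exact ⟨ha.mpr (Or.inr h1), hd.mpr (Or.inr h2)⟩
        · intro hsub x hx
          have := hsub x hx
          rw [PySem.Set.mem_inter] at this
          obtain ⟨ha, hd⟩ := hmem x
          rw [Bool.and_eq_true, pvInAcross_iff, pvInDown_iff]
          refine ⟨?_, ?_⟩
          · rcases ha.mp this.1 with h' | h'
            · exact absurd h' (by simp)
            · exact h'
          · rcases hd.mp this.2 with h' | h'
            · exact absurd h' (by simp)
            · exact h'
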